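-- pv_equiv track=rewrite | github.com/bPratik603/PDGI | python/Assignments/Assignment_9/prog_9.py | getComposite
-- ===== SOURCE A (Python) =====
-- def getComposite(num):
--
--     i = 1;
--     count = 0;
--     while( i <= num):
--         if(num % i == 0):
--             count+=1;
--         i+=1;
--
--     if(count > 2):
--         return "Composite Number";
--     else:
--         return "Not a Composite Number"
-- ===== SOURCE B (Python) =====
-- def getComposite(num):
--     if num < 4:
--         return "Not a Composite Number"
--     d = 2
--     while d * d <= num:
--         if num % d == 0:
--             return "Composite Number"
--         d += 1
--     return "Not a Composite Number"
-- ===== Notes on version B (the rewrite author's own statement) =====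
-- stated objective: faster
-- what changed: Instead of counting all divisors from 1 to num and testing count>2, B returns non-composite for num<4 and otherwise does trial division up to sqrt(num), returning composite on the first divisor found.
import Mathlib
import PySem

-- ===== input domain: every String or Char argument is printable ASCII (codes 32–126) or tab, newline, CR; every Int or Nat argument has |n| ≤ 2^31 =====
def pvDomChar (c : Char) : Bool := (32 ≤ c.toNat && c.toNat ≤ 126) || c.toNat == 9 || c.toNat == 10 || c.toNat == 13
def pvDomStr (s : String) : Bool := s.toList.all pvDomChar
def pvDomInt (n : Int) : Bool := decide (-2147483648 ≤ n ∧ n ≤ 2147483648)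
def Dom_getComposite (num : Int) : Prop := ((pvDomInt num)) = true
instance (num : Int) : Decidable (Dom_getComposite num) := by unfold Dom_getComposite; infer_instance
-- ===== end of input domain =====

-- B replaces A's O(n) scan counting all divisors 1..num by an O(sqrt n) trial division
-- (num < 4 is never composite; otherwise composite iff some d with d*d ≤ num divides num).

-- ===== PORT A =====
-- the while-loop of A: i runs while i ≤ num, count incremented when num % i == 0
def countA (num i count : Int) : Int :=
  if h : i ≤ num then
    countA num (i + 1) (if PySem.Int.mod num i = 0 then count + 1 else count)
  else count
termination_by (num + 1 - i).toNat
decreasing_by omega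

def getComposite (num : Int) : String :=
  if countA num 1 0 > 2 then "Composite Number" else "Not a Composite Number"

-- ===== PORT B =====
-- the while-loop of B: trial divisor d while d*d ≤ num, return true on first divisor
def hasSmallDiv (num d : Int) : Bool :=
  if h : d * d ≤ num then
    if PySem.Int.mod num d = 0 then true else hasSmallDiv num (d + 1)
  else false
termination_by (num + 1 - d).toNat
decreasing_by
  have hd : d ≤ num := by
    rcases le_or_gt d 0 with h1 | h1
    · nlinarith [mul_self_nonneg d]
    · nlinarith
  omega

def getComposite_alt (num : Int) : String :=
  if num < 4 then "Not a Composite Number"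
  else if hasSmallDiv num 2 then "Composite Number" else "Not a Composite Number"

-- ===== PRECONDITION & SPEC =====
def Spec_getComposite (num : Int) (out : String) : Prop := out = getComposite_alt num
instance (num : Int) (out : String) : Decidable (Spec_getComposite num out) := by unfold Spec_getComposite; infer_instance

-- ===== CLAIM (what is proved, stated in full; the proofs are below) =====
def Claim_equal_getComposite : Prop := ∀ (num : Int), Dom_getComposite num → Spec_getComposite num (getComposite num)

-- ===== LEMMAS AND PROOFS =====

lemma Icc_insert_left (i num : Int) (h : i ≤ num) :
    Finset.Icc i num = insert i (Finset.Icc (i + 1) num) := by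
  ext x
  simp only [Finset.mem_Icc, Finset.mem_insert]
  omega

-- A's loop counts the divisors of num in [i, num]
lemma countA_char (num i c : Int) :
    countA num i c =
      c + (((Finset.Icc i num).filter (fun j => PySem.Int.mod num j = 0)).card : Int) := by
  rw [countA]
  by_cases h : i ≤ num
  · rw [dif_pos h, countA_char num (i + 1), Icc_insert_left i num h, Finset.filter_insert]
    have hnot : i ∉ (Finset.Icc (i + 1) num).filter (fun j => PySem.Int.mod num j = 0) := by
      simp only [Finset.mem_filter, Finset.mem_Icc]
      rintro ⟨⟨h1, _⟩, _⟩
      omega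
    by_cases hm : PySem.Int.mod num i = 0
    · rw [if_pos hm, if_pos hm, Finset.card_insert_of_notMem hnot]
      push_cast
      ring
    · simp only [if_neg hm]
  · rw [dif_neg h, Finset.Icc_eq_empty (by omega)]
    simp
termination_by (num + 1 - i).toNat
decreasing_by omega

lemma card_gt_iff (num : Int) (h4 : 4 ≤ num) :
    2 < ((Finset.Icc 1 num).filter (fun j => PySem.Int.mod num j = 0)).card ↔
      ∃ i, 2 ≤ i ∧ i ≤ num - 1 ∧ i ∣ num := by
  constructor
  · intro h
    have hsub : ({1, num} : Finset Int) ⊆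
        (Finset.Icc 1 num).filter (fun j => PySem.Int.mod num j = 0) := by
      intro x hx
      simp only [Finset.mem_insert, Finset.mem_singleton] at hx
      simp only [Finset.mem_filter, Finset.mem_Icc, PySem.Int.mod_eq_zero_iff_dvd]
      rcases hx with rfl | rfl
      · exact ⟨⟨le_refl _, by omega⟩, one_dvd _⟩
      · exact ⟨⟨by omega, le_refl _⟩, dvd_refl _⟩
    have hcard : ({1, num} : Finset Int).card ≤ 2 :=
      le_trans (Finset.card_insert_le _ _) (by simp)
    obtain ⟨x, hxS, hx⟩ :=
      Finset.exists_mem_notMem_of_card_lt_card (lt_of_le_of_lt hcard h)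
    simp only [Finset.mem_insert, Finset.mem_singleton, not_or] at hx
    simp only [Finset.mem_filter, Finset.mem_Icc, PySem.Int.mod_eq_zero_iff_dvd] at hxS
    exact ⟨x, by omega, by omega, hxS.2⟩
  · rintro ⟨i, h2, hle, hdvd⟩
    have hsub : ({1, i, num} : Finset Int) ⊆
        (Finset.Icc 1 num).filter (fun j => PySem.Int.mod num j = 0) := by
      intro x hx
      simp only [Finset.mem_insert, Finset.mem_singleton] at hx
      simp only [Finset.mem_filter, Finset.mem_Icc, PySem.Int.mod_eq_zero_iff_dvd]
      rcases hx with rfl | rfl | rfl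
      · exact ⟨⟨le_refl _, by omega⟩, one_dvd _⟩
      · exact ⟨⟨by omega, by omega⟩, hdvd⟩
      · exact ⟨⟨by omega, le_refl _⟩, dvd_refl _⟩
    have hc : ({1, i, num} : Finset Int).card = 3 := by
      rw [Finset.card_insert_of_notMem (by simp; omega),
          Finset.card_insert_of_notMem (by simp; omega), Finset.card_singleton]
    have := Finset.card_le_card hsub
    omega

-- B's loop finds a divisor e ≥ d with e*e ≤ num, if one exists
lemma hasSmallDiv_iff (num d : Int) (hd : 0 ≤ d) :
    hasSmallDiv num d = true ↔ ∃ e, d ≤ e ∧ e * e ≤ num ∧ e ∣ num := by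
  rw [hasSmallDiv]
  by_cases h : d * d ≤ num
  · rw [dif_pos h]
    by_cases hm : PySem.Int.mod num d = 0
    · simp only [if_pos hm, true_iff]
      exact ⟨d, le_refl _, h, (PySem.Int.mod_eq_zero_iff_dvd num d).mp hm⟩
    · rw [if_neg hm, hasSmallDiv_iff num (d + 1) (by omega)]
      constructor
      · rintro ⟨e, h1, h2, h3⟩
        exact ⟨e, by omega, h2, h3⟩
      · rintro ⟨e, h1, h2, h3⟩
        refine ⟨e, ?_, h2, h3⟩
        rcases eq_or_lt_of_le h1 with heq | hlt
        · exact absurd ((PySem.Int.mod_eq_zero_iff_dvd num d).mpr (heq ▸ h3)) hm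
        · omega
  · rw [dif_neg h]
    simp only [Bool.false_eq_true, false_iff, not_exists]
    rintro e ⟨h1, h2, _⟩
    nlinarith
termination_by (num + 1 - d).toNat
decreasing_by
  have hdn : d ≤ num := by
    rcases le_or_gt d 0 with h1 | h1
    · nlinarith [mul_self_nonneg d]
    · nlinarith
  omega

lemma mid_iff_small (num : Int) (h4 : 4 ≤ num) :
    (∃ i, 2 ≤ i ∧ i ≤ num - 1 ∧ i ∣ num) ↔ (∃ e, 2 ≤ e ∧ e * e ≤ num ∧ e ∣ num) := by
  constructor
  · rintro ⟨i, h2, hle, j, hj⟩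
    rcases le_or_gt (i * i) num with hii | hii
    · exact ⟨i, h2, hii, ⟨j, hj⟩⟩
    · have hipos : (0 : Int) < i := by omega
      have hjpos : (0 : Int) < j := by nlinarith
      have hj2 : 2 ≤ j := by
        by_contra hb
        push Not at hb
        have hj1 : j = 1 := by omega
        subst hj1
        rw [mul_one] at hj
        omega
      have hjj : j * j ≤ num := by nlinarith
      exact ⟨j, hj2, hjj, ⟨i, by rw [hj]; ring⟩⟩
  · rintro ⟨e, h2, hee, hdvd⟩
    exact ⟨e, h2, by nlinarith, hdvd⟩

lemma countA_le_two (num : Int) (h : num < 4) : countA num 1 0 ≤ 2 := by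
  rcases le_or_gt num 0 with h0 | h0
  · rw [countA, dif_neg (by omega)]
    norm_num
  · interval_cases num
    · rw [countA, dif_pos (by norm_num), countA, dif_neg (by norm_num)]
      norm_num
    · rw [countA, dif_pos (by norm_num), countA, dif_pos (by norm_num),
          countA, dif_neg (by norm_num)]
      norm_num [PySem.Int.mod_eq_zero_iff_dvd]
    · rw [countA, dif_pos (by norm_num), countA, dif_pos (by norm_num),
          countA, dif_pos (by norm_num), countA, dif_neg (by norm_num)]
      norm_num [PySem.Int.mod_eq_zero_iff_dvd]

-- ===== VERDICT (by name: the statement is the Claim_ definition above) =====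
theorem getComposite_spec : Claim_equal_getComposite := by
  intro num _
  unfold Spec_getComposite getComposite getComposite_alt
  by_cases h4 : num < 4
  · rw [if_pos h4, if_neg (by have := countA_le_two num h4; omega)]
  · rw [if_neg h4]
    have h4' : (4 : Int) ≤ num := by omega
    have key : countA num 1 0 > 2 ↔ hasSmallDiv num 2 = true := by
      rw [countA_char, hasSmallDiv_iff num 2 (by norm_num), ← mid_iff_small num h4',
          ← card_gt_iff num h4']
      omega
    by_cases hc : countA num 1 0 > 2
    · rw [if_pos hc, if_pos (key.mp hc)]
    · rw [if_neg hc]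
      rw [if_neg (fun hb => hc (key.mpr hb))]
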